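-- pv_equiv track=rewrite | github.com/TheGhulam/aoc2024 | day9.py | find_free_spaces
-- ===== SOURCE A (Python) =====
-- def find_free_spaces(blocks):
--     """
--     Find all continuous spans of free space.
--     Returns a list of tuples (start_position, length).
--     """
--     free_spans = []
--     current_length = 0
--     start_pos = None
--
--     for pos, block in enumerate(blocks):
--         if block is None:
--             if start_pos is None:
--                 start_pos = pos
--             current_length += 1
--         else:
--             if current_length > 0:
--                 free_spans.append((start_pos, current_length))
--                 start_pos = None
--                 current_length = 0
--
--     # Don't forget to add the last span if it ends with free space
--     if current_length > 0:
--         free_spans.append((start_pos, current_length))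
--
--     return free_spans
-- ===== SOURCE B (Python) =====
-- def find_free_spaces(blocks):
--     """
--     Find all continuous spans of free space.
--     Returns a list of tuples (start_position, length).
--     Two-pointer run scanning: find each maximal run of equal kind at once,
--     instead of a per-element state machine with a tail flush.
--     """
--     free_spans = []
--     pos = 0
--     i = 0
--     n = len(blocks)
--     while i < n:
--         is_free = blocks[i] is None
--         j = i + 1
--         while j < n and (blocks[j] is None) == is_free:
--             j += 1
--         if is_free:
--             free_spans.append((pos, j - i))
--         pos += j - i
--         i = j
--     return free_spans
-- ===== Notes on version B (the rewrite author's own statement) =====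
-- stated objective: alternative
-- what changed: Replaced A's per-element state machine (current_length/start_pos with a post-loop tail flush) by a two-pointer scan that locates each maximal run of equal free/occupied kind at once and emits free runs with a running position counter, so no mid-run state or tail flush exists.
import Mathlib
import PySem

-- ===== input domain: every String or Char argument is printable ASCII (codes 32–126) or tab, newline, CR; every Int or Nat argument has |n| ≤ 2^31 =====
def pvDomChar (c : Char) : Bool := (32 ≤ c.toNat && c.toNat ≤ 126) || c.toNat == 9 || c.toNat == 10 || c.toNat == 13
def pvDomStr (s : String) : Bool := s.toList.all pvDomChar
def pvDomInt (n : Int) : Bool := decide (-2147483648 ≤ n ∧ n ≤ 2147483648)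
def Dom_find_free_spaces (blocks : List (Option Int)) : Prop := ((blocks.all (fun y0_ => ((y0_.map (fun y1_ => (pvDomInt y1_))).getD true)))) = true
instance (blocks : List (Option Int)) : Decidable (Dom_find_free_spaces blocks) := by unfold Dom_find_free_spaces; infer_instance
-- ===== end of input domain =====

-- B replaces A's per-element state machine + tail flush by a two-pointer maximal-run scan; same values, same cost.

-- ===== PORT A =====
-- the for-loop over enumerate(blocks) with state (free_spans, current_length, start_pos), pos counted along
def pvALoop : List (Int × Int) → Int → Option Int → Int → List (Option Int) → List (Int × Int) × Int × Option Int
  | spans, cur, start, _, [] => (spans, cur, start)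
  | spans, cur, start, pos, b :: rest =>
    match b with
    | none => pvALoop spans (cur + 1) (if start.isNone then some pos else start) (pos + 1) rest
    | some _ =>
      if cur > 0 then pvALoop (spans ++ [(start.getD 0, cur)]) 0 none (pos + 1) rest
      else pvALoop spans cur start (pos + 1) rest

def find_free_spaces (blocks : List (Option Int)) : List (Int × Int) :=
  let st := pvALoop [] 0 none 0 blocks
  -- the post-loop tail flush: if current_length > 0 then append the last span
  if st.2.1 > 0 then st.1 ++ [(st.2.2.getD 0, st.2.1)] else st.1

-- ===== PORT B =====
-- outer while: recursion on the remaining list; inner while (advancing j) = takeWhile/dropWhile of the run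
def pvBGo (pos : Int) (free_spans : List (Int × Int)) : List (Option Int) → List (Int × Int)
  | [] => free_spans
  | b :: rest =>
    let k := b.isNone
    let len : Int := 1 + (rest.takeWhile (fun x => x.isNone == k)).length
    pvBGo (pos + len) (if k then free_spans ++ [(pos, len)] else free_spans)
      (rest.dropWhile (fun x => x.isNone == k))
termination_by l => l.length
decreasing_by
  exact Nat.lt_succ_of_le (List.length_dropWhile_le _ _)

def find_free_spaces_alt (blocks : List (Option Int)) : List (Int × Int) :=
  pvBGo 0 [] blocks

-- ===== PRECONDITION & SPEC =====
def Spec_find_free_spaces (blocks : List (Option Int)) (out : List (Int × Int)) : Prop := out = find_free_spaces_alt blocks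
instance (blocks : List (Option Int)) (out : List (Int × Int)) : Decidable (Spec_find_free_spaces blocks out) := by unfold Spec_find_free_spaces; infer_instance

-- ===== CLAIM (what is proved, stated in full; the proofs are below) =====
def Claim_equal_find_free_spaces : Prop := ∀ (blocks : List (Option Int)), Dom_find_free_spaces blocks → Spec_find_free_spaces blocks (find_free_spaces blocks)

-- ===== LEMMAS AND PROOFS =====

-- reference function: the list of (start, length) of maximal free runs starting at position pos
def freeSpec (pos : Int) : List (Option Int) → List (Int × Int)
  | [] => []
  | none :: rest =>
      (pos, 1 + ((rest.takeWhile (fun x => x.isNone)).length : Int)) ::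
        freeSpec (pos + 1 + ((rest.takeWhile (fun x => x.isNone)).length : Int))
          (rest.dropWhile (fun x => x.isNone))
  | some _ :: rest => freeSpec (pos + 1) rest
termination_by l => l.length
decreasing_by
  · exact Nat.lt_succ_of_le (List.length_dropWhile_le _ _)
  · simp

-- skipping a maximal run of occupied blocks does not change freeSpec
lemma freeSpec_skip (rest : List (Option Int)) : ∀ (pos : Int),
    freeSpec (pos + 1 + ((rest.takeWhile (fun x => x.isNone == false)).length : Int))
        (rest.dropWhile (fun x => x.isNone == false))
      = freeSpec (pos + 1) rest := by
  induction rest with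
  | nil => intro pos; simp [freeSpec]
  | cons b r ih =>
    intro pos
    cases b with
    | none => simp [List.takeWhile, List.dropWhile]
    | some v =>
      have h := ih (pos + 1)
      rw [show List.takeWhile (fun x : Option Int => x.isNone == false) (some v :: r)
            = some v :: List.takeWhile (fun x => x.isNone == false) r from by simp,
          show List.dropWhile (fun x : Option Int => x.isNone == false) (some v :: r)
            = List.dropWhile (fun x => x.isNone == false) r from by simp,
          show freeSpec (pos + 1) (some v :: r) = freeSpec (pos + 1 + 1) r from by
            rw [freeSpec]]
      rw [show pos + 1 + (((some v :: List.takeWhile (fun x : Option Int => x.isNone == false) r).length : Nat) : Int)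
            = pos + 1 + 1 + ((List.takeWhile (fun x : Option Int => x.isNone == false) r).length : Int) from by
          push_cast [List.length_cons]; ring]
      exact h

-- A's loop, started in the "no current run" state, appends exactly the free runs
lemma pvALoop_spec (blocks : List (Option Int)) : ∀ (spans : List (Int × Int)) (pos : Int),
    ((let st := pvALoop spans 0 none pos blocks
      if st.2.1 > 0 then st.1 ++ [(st.2.2.getD 0, st.2.1)] else st.1)
        = spans ++ freeSpec pos blocks)
    ∧ (∀ (cur s : Int), cur > 0 →
      (let st := pvALoop spans cur (some s) pos blocks
       if st.2.1 > 0 then st.1 ++ [(st.2.2.getD 0, st.2.1)] else st.1)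
        = spans ++ (s, cur + ((blocks.takeWhile (fun x => x.isNone)).length : Int)) ::
            freeSpec (pos + ((blocks.takeWhile (fun x => x.isNone)).length : Int))
              (blocks.dropWhile (fun x => x.isNone))) := by
  induction blocks with
  | nil =>
    intro spans pos
    constructor
    · simp [pvALoop, freeSpec]
    · intro cur s hcur
      simp [pvALoop, freeSpec, hcur]
  | cons b rest ih =>
    intro spans pos
    cases b with
    | none =>
      constructor
      · have e : pvALoop spans 0 none pos (none :: rest)
            = pvALoop spans 1 (some pos) (pos + 1) rest := by
          norm_num [pvALoop]
        have h2 := (ih spans (pos + 1)).2 1 pos (by norm_num)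
        simp only [e]
        rw [h2]
        simp [freeSpec, add_assoc]
      · intro cur s hcur
        have e : pvALoop spans cur (some s) pos (none :: rest)
            = pvALoop spans (cur + 1) (some s) (pos + 1) rest := by
          norm_num [pvALoop]
        have h2 := (ih spans (pos + 1)).2 (cur + 1) s (by omega)
        simp only [e]
        rw [h2]
        simp only [List.takeWhile, List.dropWhile, Option.isNone_none, List.length_cons]
        refine congrArg (spans ++ ·) ?_
        congr 1
        · congr 1
          push_cast; ring
        · congr 1
          push_cast; ring
    | some v =>
      constructor
      · have e : pvALoop spans 0 none pos (some v :: rest)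
            = pvALoop spans 0 none (pos + 1) rest := by
          norm_num [pvALoop]
        have h1 := (ih spans (pos + 1)).1
        simp only [e]
        rw [h1]
        simp [freeSpec]
      · intro cur s hcur
        have e : pvALoop spans cur (some s) pos (some v :: rest)
            = pvALoop (spans ++ [(s, cur)]) 0 none (pos + 1) rest := by
          norm_num [pvALoop, hcur]
        have h1 := (ih (spans ++ [(s, cur)]) (pos + 1)).1
        simp only [e]
        rw [h1]
        simp [freeSpec, List.takeWhile, List.dropWhile]

-- B's two-pointer scan appends exactly the free runs (strong induction on the list length)
lemma pvBGo_spec_aux : ∀ (n : Nat) (blocks : List (Option Int)), blocks.length ≤ n →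
    ∀ (pos : Int) (res : List (Int × Int)), pvBGo pos res blocks = res ++ freeSpec pos blocks := by
  intro n
  induction n with
  | zero =>
    intro blocks h pos res
    rw [List.eq_nil_iff_length_eq_zero.mpr (Nat.le_zero.mp h)]
    simp [pvBGo, freeSpec]
  | succ n ihn =>
    intro blocks h pos res
    cases blocks with
    | nil => simp [pvBGo, freeSpec]
    | cons b rest =>
      have hrest : rest.length ≤ n := by simpa using Nat.le_of_succ_le_succ h
      cases b with
      | none =>
        rw [pvBGo]
        simp only [Option.isNone_none]
        rw [ihn _ (le_trans (List.length_dropWhile_le _ _) hrest)]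
        simp only [beq_true]
        rw [show freeSpec pos (none :: rest)
              = (pos, 1 + ((rest.takeWhile (fun x => x.isNone)).length : Int)) ::
                  freeSpec (pos + 1 + ((rest.takeWhile (fun x => x.isNone)).length : Int))
                    (rest.dropWhile (fun x => x.isNone)) from by rw [freeSpec]]
        simp [add_assoc]
      | some v =>
        rw [pvBGo]
        simp only [Option.isNone_some]
        rw [ihn _ (le_trans (List.length_dropWhile_le _ _) hrest)]
        rw [show pos + (1 + ((rest.takeWhile (fun x => x.isNone == false)).length : Int))
              = pos + 1 + ((rest.takeWhile (fun x => x.isNone == false)).length : Int) from by ring]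
        rw [freeSpec_skip]
        rw [show freeSpec pos (some v :: rest) = freeSpec (pos + 1) rest from by rw [freeSpec]]
        simp

lemma pvBGo_spec (blocks : List (Option Int)) (pos : Int) (res : List (Int × Int)) :
    pvBGo pos res blocks = res ++ freeSpec pos blocks :=
  pvBGo_spec_aux blocks.length blocks le_rfl pos res

-- ===== VERDICT (by name: the statement is the Claim_ definition above) =====
theorem find_free_spaces_spec : Claim_equal_find_free_spaces := by
  intro blocks _
  show find_free_spaces blocks = find_free_spaces_alt blocks
  rw [find_free_spaces, find_free_spaces_alt, pvBGo_spec]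
  exact (pvALoop_spec blocks [] 0).1
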